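-- pv_equiv track=rewrite | github.com/peppermintpatty5/advent2020 | src/24.py | splitDirections
-- ===== SOURCE A (Python) =====
-- def splitDirections(line: str) -> list:
--     directions = []
--     i = 0
--     while i < len(line):
--         if line[i] == "n" or line[i] == "s":
--             directions.append(line[i : i + 2])
--             i += 2
--         else:
--             directions.append(line[i])
--             i += 1
--     return directions
-- ===== SOURCE B (Python) =====
-- def splitDirections(line: str) -> list:
--     it = iter(line)
--     return [c + next(it, "") if c in "ns" else c for c in it]
-- ===== Notes on version B (the rewrite author's own statement) =====
-- stated objective: idiomatic
-- what changed: Replaces the index-walking while loop with slicing by a single-pass iterator comprehension that pulls the extra character with next() after an n/s.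
import Mathlib
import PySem

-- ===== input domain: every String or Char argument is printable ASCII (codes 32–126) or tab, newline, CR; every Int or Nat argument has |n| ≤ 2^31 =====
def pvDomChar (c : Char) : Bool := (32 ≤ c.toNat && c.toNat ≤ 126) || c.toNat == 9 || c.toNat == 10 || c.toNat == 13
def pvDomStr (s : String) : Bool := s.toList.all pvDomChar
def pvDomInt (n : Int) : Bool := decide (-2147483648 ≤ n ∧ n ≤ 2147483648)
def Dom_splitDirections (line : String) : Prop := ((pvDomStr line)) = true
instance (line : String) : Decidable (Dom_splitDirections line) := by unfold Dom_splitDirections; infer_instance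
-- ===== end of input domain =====

-- B replaces A's index-walking while loop (with slicing) by a single forward pass that
-- consumes one extra character after each 'n'/'s'; same return value, no side effects.

-- ===== PORT A =====
-- the while loop over index i; len(line)/line[i]/line[i:i+2] on the code-point side (exact)
def splitDirectionsGo (line : String) (i : Nat) : List String :=
  if h : i < line.toList.length then
    match PySem.Str.pyGet? line (i : Int) with
    | some c =>
      if c = 'n' ∨ c = 's' then
        PySem.Str.slice line (some (i : Int)) (some ((i : Int) + 2)) :: splitDirectionsGo line (i + 2)
      else
        String.ofList [c] :: splitDirectionsGo line (i + 1)
    | none => []   -- unreachable: i is in range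
  else []
termination_by line.toList.length - i
decreasing_by all_goals (have h2 : line.toList.length = line.length := String.length_toList; omega)

def splitDirections (line : String) : List String := splitDirectionsGo line 0

-- ===== PORT B =====
-- 'for c in it' with 'next(it, "")' = structural recursion on the character list
def splitDirectionsAltGo : List Char → List String
  | [] => []
  | c :: rest =>
    if c = 'n' ∨ c = 's' then
      match rest with
      | [] => [String.ofList [c]]                                -- next with empty default at end
      | d :: rest' => String.ofList [c, d] :: splitDirectionsAltGo rest'
    else
      String.ofList [c] :: splitDirectionsAltGo rest

def splitDirections_alt (line : String) : List String := splitDirectionsAltGo line.toList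

-- ===== PRECONDITION & SPEC =====
def Spec_splitDirections (line : String) (out : List String) : Prop := out = splitDirections_alt line
instance (line : String) (out : List String) : Decidable (Spec_splitDirections line out) := by unfold Spec_splitDirections; infer_instance

-- ===== CLAIM (what is proved, stated in full; the proofs are below) =====
def Claim_equal_splitDirections : Prop := ∀ (line : String), Dom_splitDirections line → Spec_splitDirections line (splitDirections line)

-- ===== LEMMAS AND PROOFS =====

lemma str_eq_ofList (s : String) (l : List Char) (h : s.toList = l) : s = String.ofList l := by
  rw [← h, String.ofList_toList]

lemma altGo_cons_not_ns (c : Char) (rest : List Char) (h : ¬ (c = 'n' ∨ c = 's')) :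
    splitDirectionsAltGo (c :: rest) = String.ofList [c] :: splitDirectionsAltGo rest := by
  rw [splitDirectionsAltGo.eq_def]
  simp [h]

lemma splitDirectionsGo_eq (line : String) :
    ∀ n i, line.toList.length - i ≤ n →
      splitDirectionsGo line i = splitDirectionsAltGo (line.toList.drop i) := by
  intro n
  induction n with
  | zero =>
    intro i h
    have hi : ¬ i < line.length := by
      have h2 : line.toList.length = line.length := String.length_toList
      omega
    rw [splitDirectionsGo.eq_def, List.drop_eq_nil_of_le (by omega)]
    simp [hi, splitDirectionsAltGo]
  | succ n ih =>
    intro i h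
    rw [splitDirectionsGo.eq_def]
    have h2 : line.toList.length = line.length := String.length_toList
    by_cases hi : i < line.toList.length
    · have hi' : i < line.length := by omega
      have hget : PySem.Str.pyGet? line (i : Int) = some (line.toList[i]) := by
        simp [List.getElem?_eq_getElem hi]
        rfl
      have hdrop : line.toList.drop i = line.toList[i] :: line.toList.drop (i + 1) :=
        List.drop_eq_getElem_cons hi
      rw [hdrop]
      simp only [hi', hget, String.length_toList]
      by_cases hns : line.toList[i] = 'n' ∨ line.toList[i] = 's'
      · simp only [hns, if_pos]
        have hslice : (PySem.Str.slice line (some (i : Int)) (some ((i : Int) + 2))).toList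
            = (line.toList.drop i).take 2 := by
          rw [PySem.Str.toList_slice]
          simpa using PySem.List.slice_natCast_add (xs := line.toList) (j := i) (n := 2)
        cases h1 : line.toList.drop (i + 1) with
        | nil =>
          have hlen : line.toList.length = i + 1 := by
            have := List.drop_eq_nil_iff.mp h1
            omega
          have hs : (PySem.Str.slice line (some (i : Int)) (some ((i : Int) + 2)))
              = String.ofList [line.toList[i]] := by
            apply str_eq_ofList
            rw [hslice, hdrop, h1]
            simp
          rw [hs, ih (i + 2) (by omega), List.drop_eq_nil_of_le (by omega)]
          simp [splitDirectionsAltGo, hns]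
        | cons d rest' =>
          have hd2 : line.toList.drop (i + 2) = rest' := by
            have hdd : line.toList.drop (i + 2) = (line.toList.drop (i + 1)).drop 1 := by
              rw [List.drop_drop]
            rw [hdd, h1]; rfl
          have hs : (PySem.Str.slice line (some (i : Int)) (some ((i : Int) + 2)))
              = String.ofList [line.toList[i], d] := by
            apply str_eq_ofList
            rw [hslice, hdrop, h1]
            simp
          rw [hs, ih (i + 2) (by omega), hd2]
          simp [splitDirectionsAltGo, hns]
      · rw [altGo_cons_not_ns _ _ hns, ih (i + 1) (by omega)]
        simp [hns]
    · have hi' : ¬ i < line.length := by omega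
      rw [List.drop_eq_nil_of_le (by omega)]
      simp [hi', splitDirectionsAltGo]

-- ===== VERDICT (by name: the statement is the Claim_ definition above) =====
theorem splitDirections_spec : Claim_equal_splitDirections := by
  intro line _
  unfold Spec_splitDirections splitDirections splitDirections_alt
  simpa using splitDirectionsGo_eq line line.toList.length 0 (by omega)
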